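-- pv_equiv track=rewrite | github.com/Viknesh-Rajaramon/Leetcode-Problems | Algorithms/Medium/3811_Number_of_Alternating_XOR_Partitions.py | alternatingXOR
-- ===== SOURCE A (Python) =====
-- from typing import List
--
-- def alternatingXOR(nums: List[int], target1: int, target2: int) -> int:
--     mod, prefix_xor, dp1, dp2, result1, result2 = 10**9+7, 0, {0: 1}, {}, 0, 0
--     for num in nums:
--         prefix_xor ^= num
--         n1, n2 = dp1.get(prefix_xor ^ target1, 0), dp2.get(prefix_xor ^ target2, 0)
--         new_dp1, new_dp2 = {}, {}
--
--         if n1: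
--             new_dp2[prefix_xor] = n1 % mod
--
--         if n2:
--             new_dp1[prefix_xor] = n2 % mod
--
--         for key, val in dp1.items():
--             new_dp1[key] = (new_dp1.get(key, 0) + val) % mod
--
--         for key, val in dp2.items():
--             new_dp2[key] = (new_dp2.get(key, 0) + val) % mod
--
--         dp1, dp2, result1, result2 = new_dp1, new_dp2, n1, n2
--
--     return (result1 + result2) % mod
-- ===== SOURCE B (Python) =====
-- from typing import List
--
-- def alternatingXOR(nums: List[int], target1: int, target2: int) -> int:
--     # One pass with in-place dict updates: instead of rebuilding both DP tables
--     # each step, only the prefix_xor entry of each table changes.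
--     mod = 10**9 + 7
--     prefix_xor = 0
--     dp1, dp2 = {0: 1}, {}
--     n1 = n2 = 0
--     for num in nums:
--         prefix_xor ^= num
--         n1 = dp1.get(prefix_xor ^ target1, 0)
--         n2 = dp2.get(prefix_xor ^ target2, 0)
--         if n2:
--             dp1[prefix_xor] = (dp1.get(prefix_xor, 0) + n2) % mod
--         if n1:
--             dp2[prefix_xor] = (dp2.get(prefix_xor, 0) + n1) % mod
--     return (n1 + n2) % mod
-- ===== Notes on version B (the rewrite author's own statement) =====
-- stated objective: faster
-- what changed: Instead of rebuilding both DP dictionaries from scratch on every element (copying all entries each iteration), B updates at most the single prefix_xor entry of each dictionary in place, guarded by the same truthiness tests A uses.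
import Mathlib
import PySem

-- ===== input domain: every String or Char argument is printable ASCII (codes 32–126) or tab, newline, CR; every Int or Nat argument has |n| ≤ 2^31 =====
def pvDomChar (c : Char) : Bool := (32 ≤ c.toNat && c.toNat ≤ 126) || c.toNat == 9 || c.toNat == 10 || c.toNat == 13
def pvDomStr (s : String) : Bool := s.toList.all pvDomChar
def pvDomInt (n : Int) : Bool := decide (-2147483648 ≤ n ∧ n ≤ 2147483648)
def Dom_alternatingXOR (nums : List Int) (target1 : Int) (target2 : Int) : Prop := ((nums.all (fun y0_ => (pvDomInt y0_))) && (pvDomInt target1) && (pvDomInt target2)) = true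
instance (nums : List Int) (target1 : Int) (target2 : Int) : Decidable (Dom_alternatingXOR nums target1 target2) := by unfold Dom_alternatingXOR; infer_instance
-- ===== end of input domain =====

-- B replaces A's per-step rebuild of both DP dicts by an in-place update of the
-- single prefix_xor entry of each dict; return values agree.

-- ===== PORT A =====
def pvM : Int := 10 ^ 9 + 7

-- one iteration of A's loop body: state = (prefix_xor, dp1, dp2, result1, result2)
def pvStepA (t1 t2 : Int)
    (s : Int × PySem.Dict Int Int × PySem.Dict Int Int × Int × Int) (num : Int) :
    Int × PySem.Dict Int Int × PySem.Dict Int Int × Int × Int :=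
  let px := PySem.Int.bxor s.1 num
  let n1 := (s.2.1).getD (PySem.Int.bxor px t1) 0
  let n2 := (s.2.2.1).getD (PySem.Int.bxor px t2) 0
  -- new_dp2 gets n1 % mod at px if n1 truthy; new_dp1 gets n2 % mod at px if n2 truthy
  let nd2i : PySem.Dict Int Int :=
    if n1 ≠ 0 then PySem.Dict.empty.insert px (PySem.Int.mod n1 pvM) else PySem.Dict.empty
  let nd1i : PySem.Dict Int Int :=
    if n2 ≠ 0 then PySem.Dict.empty.insert px (PySem.Int.mod n2 pvM) else PySem.Dict.empty
  -- for key, val in dp1.items(): new_dp1[key] = (new_dp1.get(key, 0) + val) % mod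
  let nd1 := (s.2.1).items.foldl
    (fun d kv => d.insert kv.1 (PySem.Int.mod (d.getD kv.1 0 + kv.2) pvM)) nd1i
  let nd2 := (s.2.2.1).items.foldl
    (fun d kv => d.insert kv.1 (PySem.Int.mod (d.getD kv.1 0 + kv.2) pvM)) nd2i
  (px, nd1, nd2, n1, n2)

def alternatingXOR (nums : List Int) (target1 : Int) (target2 : Int) : Int :=
  let s := nums.foldl (pvStepA target1 target2)
    (0, PySem.Dict.empty.insert 0 1, PySem.Dict.empty, 0, 0)
  PySem.Int.mod (s.2.2.2.1 + s.2.2.2.2) pvM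

-- ===== PORT B =====
-- one iteration of B's loop body: only the prefix_xor entry of each dict is updated
def pvStepB (t1 t2 : Int)
    (s : Int × PySem.Dict Int Int × PySem.Dict Int Int × Int × Int) (num : Int) :
    Int × PySem.Dict Int Int × PySem.Dict Int Int × Int × Int :=
  let px := PySem.Int.bxor s.1 num
  let n1 := (s.2.1).getD (PySem.Int.bxor px t1) 0
  let n2 := (s.2.2.1).getD (PySem.Int.bxor px t2) 0
  (px,
   if n2 ≠ 0 then (s.2.1).insert px (PySem.Int.mod ((s.2.1).getD px 0 + n2) pvM) else s.2.1,
   if n1 ≠ 0 then (s.2.2.1).insert px (PySem.Int.mod ((s.2.2.1).getD px 0 + n1) pvM) else s.2.2.1,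
   n1, n2)

def alternatingXOR_alt (nums : List Int) (target1 : Int) (target2 : Int) : Int :=
  let s := nums.foldl (pvStepB target1 target2)
    (0, PySem.Dict.empty.insert 0 1, PySem.Dict.empty, 0, 0)
  PySem.Int.mod (s.2.2.2.1 + s.2.2.2.2) pvM

-- ===== PRECONDITION & SPEC =====
def Spec_alternatingXOR (nums : List Int) (target1 : Int) (target2 : Int) (out : Int) : Prop := out = alternatingXOR_alt nums target1 target2
instance (nums : List Int) (target1 : Int) (target2 : Int) (out : Int) : Decidable (Spec_alternatingXOR nums target1 target2 out) := by unfold Spec_alternatingXOR; infer_instance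

-- ===== CLAIM (what is proved, stated in full; the proofs are below) =====
def Claim_equal_alternatingXOR : Prop := ∀ (nums : List Int) (target1 : Int) (target2 : Int), Dom_alternatingXOR nums target1 target2 → Spec_alternatingXOR nums target1 target2 (alternatingXOR nums target1 target2)

-- ===== LEMMAS AND PROOFS =====

-- coupling invariant between A's and B's loop states: same prefix_xor and results,
-- pointwise-equal dict lookups; A's dicts have nodup keys and values in [0, pvM)
def pvRel (sa sb : Int × PySem.Dict Int Int × PySem.Dict Int Int × Int × Int) : Prop :=
  sa.1 = sb.1 ∧
  (∀ q : Int, sa.2.1.getD q 0 = sb.2.1.getD q 0) ∧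
  (∀ q : Int, sa.2.2.1.getD q 0 = sb.2.2.1.getD q 0) ∧
  sa.2.2.2.1 = sb.2.2.2.1 ∧ sa.2.2.2.2 = sb.2.2.2.2 ∧
  sa.2.1.keys.Nodup ∧ sa.2.2.1.keys.Nodup ∧
  (∀ q : Int, 0 ≤ sa.2.1.getD q 0 ∧ sa.2.1.getD q 0 < pvM) ∧
  (∀ q : Int, 0 ≤ sa.2.2.1.getD q 0 ∧ sa.2.2.1.getD q 0 < pvM)

lemma pvM_pos : (0 : Int) < pvM := by norm_num [pvM]

-- A's copy loop over dp.items, characterised by lookups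
lemma pvFold_getD (l : List (Int × Int)) (hl : (l.map Prod.fst).Nodup)
    (d : PySem.Dict Int Int) (q : Int) :
    (l.foldl (fun d kv => d.insert kv.1 (PySem.Int.mod (d.getD kv.1 0 + kv.2) pvM)) d).getD q 0 =
    match l.find? (fun kv => kv.1 == q) with
    | some kv => PySem.Int.mod (d.getD q 0 + kv.2) pvM
    | none => d.getD q 0 := by
  induction l generalizing d with
  | nil => simp
  | cons kv rest ih =>
    obtain ⟨k, v⟩ := kv
    simp only [List.map_cons, List.nodup_cons] at hl
    rw [List.foldl_cons, ih hl.2]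
    by_cases hqk : k = q
    · subst hqk
      have hn : rest.find? (fun kv => kv.1 == k) = none := by
        rw [List.find?_eq_none]
        intro x hx
        simp only [beq_iff_eq]
        intro h
        exact hl.1 (h ▸ List.mem_map_of_mem hx)
      rw [hn]
      simp [PySem.Dict.getD_insert_self]
    · have hfind : ((k, v) :: rest).find? (fun kv => kv.1 == q) =
          rest.find? (fun kv => kv.1 == q) := by
        rw [List.find?_cons_of_neg]
        simp [hqk]
      rw [hfind]
      cases hrf : rest.find? (fun kv => kv.1 == q) with
      | some kv' => rw [PySem.Dict.getD_insert_of_ne _ _ _ (Ne.symm hqk)]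
      | none => rw [PySem.Dict.getD_insert_of_ne _ _ _ (Ne.symm hqk)]

-- lookup characterisation of A's whole new dict (copy loop started from the seeded dict)
lemma pvNew_getD (dA : PySem.Dict Int Int) (hnd : dA.keys.Nodup)
    (hr : ∀ q : Int, 0 ≤ dA.getD q 0 ∧ dA.getD q 0 < pvM)
    (px n2 : Int) (q : Int) :
    (dA.items.foldl (fun d kv => d.insert kv.1 (PySem.Int.mod (d.getD kv.1 0 + kv.2) pvM))
      (if n2 ≠ 0 then PySem.Dict.empty.insert px (PySem.Int.mod n2 pvM) else PySem.Dict.empty)).getD q 0 =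
    if q = px then PySem.Int.mod (dA.getD q 0 + n2) pvM else dA.getD q 0 := by
  have hkeys : (dA.items.map Prod.fst).Nodup := hnd
  rw [pvFold_getD _ hkeys]
  have hinit : ∀ r : Int,
      (if n2 ≠ 0 then PySem.Dict.empty.insert px (PySem.Int.mod n2 pvM)
       else PySem.Dict.empty).getD r 0 =
      if r = px then PySem.Int.mod n2 pvM else 0 := by
    intro r
    by_cases hn2 : n2 = 0
    · subst hn2
      rw [if_neg (by simp), PySem.Dict.getD_empty,
          PySem.Int.mod_eq_emod_of_pos pvM_pos, Int.zero_emod]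
      simp
    · rw [if_pos hn2, PySem.Dict.getD_insert]
      by_cases hr' : r = px <;> simp [hr', PySem.Dict.getD_empty]
  cases hfind : dA.items.find? (fun kv => kv.1 == q) with
  | some kv =>
    have hget : dA.get? q = some kv.2 := by
      unfold PySem.Dict.get?
      rw [hfind]
      rfl
    have hgd : dA.getD q 0 = kv.2 := PySem.Dict.getD_of_get?_eq_some dA 0 hget
    rw [hinit, hgd]
    change PySem.Int.mod ((if q = px then PySem.Int.mod n2 pvM else 0) + kv.2) pvM =
      if q = px then PySem.Int.mod (kv.2 + n2) pvM else kv.2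
    by_cases hq : q = px
    · simp only [hq, if_true]
      rw [PySem.Int.mod_eq_emod_of_pos pvM_pos, PySem.Int.mod_eq_emod_of_pos pvM_pos,
          PySem.Int.mod_eq_emod_of_pos pvM_pos, Int.emod_add_emod, Int.add_comm]
    · simp only [hq, if_false]
      rw [PySem.Int.mod_eq_emod_of_pos pvM_pos, zero_add, ← hgd]
      exact Int.emod_eq_of_lt (hr q).1 (hr q).2
  | none =>
    have hget : dA.get? q = none := by
      unfold PySem.Dict.get?
      rw [hfind]
      rfl
    have hgd : dA.getD q 0 = 0 := PySem.Dict.getD_of_get?_eq_none dA 0 hget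
    rw [hinit, hgd]
    change (if q = px then PySem.Int.mod n2 pvM else 0) =
      if q = px then PySem.Int.mod (0 + n2) pvM else 0
    by_cases hq : q = px
    · simp only [hq, if_true]
      rw [PySem.Int.mod_eq_emod_of_pos pvM_pos, PySem.Int.mod_eq_emod_of_pos pvM_pos, zero_add]
    · simp [hq]

-- A's copy loop keeps keys nodup
lemma pvNew_nodup (dA : PySem.Dict Int Int) (d0 : PySem.Dict Int Int) (h0 : d0.keys.Nodup) :
    (dA.items.foldl (fun d kv => d.insert kv.1 (PySem.Int.mod (d.getD kv.1 0 + kv.2) pvM))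
      d0).keys.Nodup :=
  PySem.Dict.nodup_keys_foldl_insert_key dA.items Prod.fst
    (fun d kv => PySem.Int.mod (d.getD kv.1 0 + kv.2) pvM) d0 h0

lemma pvSeed_nodup (n px : Int) :
    (if n ≠ 0 then PySem.Dict.empty.insert px (PySem.Int.mod n pvM)
     else (PySem.Dict.empty : PySem.Dict Int Int)).keys.Nodup := by
  by_cases hz : n = 0
  · simp only [hz, ne_eq, not_true_eq_false, if_false]
    exact PySem.Dict.nodup_keys_empty
  · simp only [hz, ne_eq, not_false_eq_true, if_true]
    exact PySem.Dict.nodup_keys_insert _ _ _ PySem.Dict.nodup_keys_empty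

lemma pvStep_rel (t1 t2 : Int) (sa sb : Int × PySem.Dict Int Int × PySem.Dict Int Int × Int × Int)
    (h : pvRel sa sb) (num : Int) : pvRel (pvStepA t1 t2 sa num) (pvStepB t1 t2 sb num) := by
  obtain ⟨hpx, hd1, hd2, hr1, hr2, hn1, hn2, hb1, hb2⟩ := h
  obtain ⟨pa, da1, da2, ra1, ra2⟩ := sa
  obtain ⟨pb, db1, db2, rb1, rb2⟩ := sb
  simp only at hpx hd1 hd2 hr1 hr2 hn1 hn2 hb1 hb2
  subst hpx hr1 hr2
  simp only [pvStepA, pvStepB]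
  unfold pvRel
  dsimp only
  refine ⟨rfl, ?_, ?_, hd1 _, hd2 _, ?_, ?_, ?_, ?_⟩
  · intro q
    rw [pvNew_getD da1 hn1 hb1 _ _ q, ← hd2]
    by_cases hz : da2.getD (PySem.Int.bxor (PySem.Int.bxor pa num) t2) 0 = 0
    · rw [if_neg (not_not_intro hz), hz, add_zero]
      by_cases hq : q = PySem.Int.bxor pa num
      · rw [if_pos hq, PySem.Int.mod_eq_emod_of_pos pvM_pos,
            Int.emod_eq_of_lt (hb1 q).1 (hb1 q).2, hd1 q]
      · rw [if_neg hq, hd1 q]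
    · rw [if_pos hz, PySem.Dict.getD_insert]
      by_cases hq : q = PySem.Int.bxor pa num
      · subst hq
        rw [if_pos rfl, if_pos rfl, hd1]
      · rw [if_neg hq, if_neg hq, hd1 q]
  · intro q
    rw [pvNew_getD da2 hn2 hb2 _ _ q, ← hd1]
    by_cases hz : da1.getD (PySem.Int.bxor (PySem.Int.bxor pa num) t1) 0 = 0
    · rw [if_neg (not_not_intro hz), hz, add_zero]
      by_cases hq : q = PySem.Int.bxor pa num
      · rw [if_pos hq, PySem.Int.mod_eq_emod_of_pos pvM_pos,
            Int.emod_eq_of_lt (hb2 q).1 (hb2 q).2, hd2 q]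
      · rw [if_neg hq, hd2 q]
    · rw [if_pos hz, PySem.Dict.getD_insert]
      by_cases hq : q = PySem.Int.bxor pa num
      · subst hq
        rw [if_pos rfl, if_pos rfl, hd2]
      · rw [if_neg hq, if_neg hq, hd2 q]
  · exact pvNew_nodup da1 _ (pvSeed_nodup _ _)
  · exact pvNew_nodup da2 _ (pvSeed_nodup _ _)
  · intro q
    rw [pvNew_getD da1 hn1 hb1 _ _ q]
    by_cases hq : q = PySem.Int.bxor pa num
    · simp only [hq, if_true]
      exact ⟨PySem.Int.mod_nonneg _ pvM_pos, PySem.Int.mod_lt _ pvM_pos⟩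
    · simp only [hq, if_false]
      exact hb1 q
  · intro q
    rw [pvNew_getD da2 hn2 hb2 _ _ q]
    by_cases hq : q = PySem.Int.bxor pa num
    · simp only [hq, if_true]
      exact ⟨PySem.Int.mod_nonneg _ pvM_pos, PySem.Int.mod_lt _ pvM_pos⟩
    · simp only [hq, if_false]
      exact hb2 q

lemma pvFoldl_rel (t1 t2 : Int) (nums : List Int)
    (sa sb : Int × PySem.Dict Int Int × PySem.Dict Int Int × Int × Int) (h : pvRel sa sb) :
    pvRel (nums.foldl (pvStepA t1 t2) sa) (nums.foldl (pvStepB t1 t2) sb) := by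
  induction nums generalizing sa sb with
  | nil => exact h
  | cons n rest ih => exact ih _ _ (pvStep_rel t1 t2 sa sb h n)

lemma pvRel_init :
    pvRel (0, PySem.Dict.empty.insert 0 1, PySem.Dict.empty, 0, 0)
          (0, PySem.Dict.empty.insert 0 1, PySem.Dict.empty, 0, 0) := by
  refine ⟨rfl, fun _ => rfl, fun _ => rfl, rfl, rfl, ?_, PySem.Dict.nodup_keys_empty, ?_, ?_⟩
  · exact PySem.Dict.nodup_keys_insert _ _ _ PySem.Dict.nodup_keys_empty
  · intro q
    rw [PySem.Dict.getD_insert]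
    by_cases hq : q = 0 <;> simp [hq, PySem.Dict.getD_empty, pvM]
  · intro q
    rw [PySem.Dict.getD_empty]
    exact ⟨le_refl 0, pvM_pos⟩

-- ===== VERDICT (by name: the statement is the Claim_ definition above) =====
theorem alternatingXOR_spec : Claim_equal_alternatingXOR := by
  intro nums t1 t2 _
  unfold Spec_alternatingXOR alternatingXOR alternatingXOR_alt
  have h := pvFoldl_rel t1 t2 nums _ _ pvRel_init
  obtain ⟨_, _, _, h1, h2, _⟩ := h
  simp only [h1, h2]
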